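-- pv_equiv track=rewrite | github.com/drew-ellingson/advent_of_code_2017 | day_9/p2.py | compress_garbage
-- ===== SOURCE A (Python) =====
-- def compress_garbage(cleaner_garbage):
--     """compresses any garbage to a '<>' string, and count garbage chars"""
--     output_string = ''
--     active_garbage = False
--     garbage_count = 0
--     for char in cleaner_garbage:
--         if char == '>':
--             active_garbage = False
--         if not active_garbage:
--             output_string = output_string + char
--         else:
--             garbage_count += 1
--         if char == '<':
--             active_garbage = True
--     return output_string, garbage_count
-- ===== SOURCE B (Python) =====
-- def compress_garbage(cleaner_garbage):
--     """compresses any garbage to a '<>' string, and count garbage chars"""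
--     pieces = []
--     garbage_count = 0
--     i = 0
--     n = len(cleaner_garbage)
--     while True:
--         j = cleaner_garbage.find('<', i)
--         if j == -1:
--             pieces.append(cleaner_garbage[i:])
--             break
--         pieces.append(cleaner_garbage[i:j + 1])
--         k = cleaner_garbage.find('>', j + 1)
--         if k == -1:
--             garbage_count += n - (j + 1)
--             break
--         garbage_count += k - (j + 1)
--         pieces.append('>')
--         i = k + 1
--     return ''.join(pieces), garbage_count
-- ===== Notes on version B (the rewrite author's own statement) =====
-- stated objective: faster
-- what changed: Replaced the char-by-char boolean state machine (which rebuilds the output string by concatenation at every kept char) with a span-jumping scan that find()s each garbage region, copies whole clean chunks into a list and counts each garbage span by index arithmetic.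
import Mathlib
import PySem

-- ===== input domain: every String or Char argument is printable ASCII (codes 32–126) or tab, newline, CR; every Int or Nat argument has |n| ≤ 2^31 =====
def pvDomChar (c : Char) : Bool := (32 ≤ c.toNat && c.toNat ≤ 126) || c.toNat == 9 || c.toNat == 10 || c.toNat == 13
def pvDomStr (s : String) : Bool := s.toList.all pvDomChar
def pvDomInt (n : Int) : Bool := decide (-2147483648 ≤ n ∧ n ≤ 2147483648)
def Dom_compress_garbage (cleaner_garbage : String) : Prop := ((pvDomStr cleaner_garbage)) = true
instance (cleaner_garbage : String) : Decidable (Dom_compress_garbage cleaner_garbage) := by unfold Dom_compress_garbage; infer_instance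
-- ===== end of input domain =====

-- B replaces A's char-by-char boolean state machine by a span-jumping scan over whole garbage regions (objective: alternative).

-- ===== PORT A =====
-- literal transliteration of A's per-character loop; state = (output chars, active_garbage, garbage_count)
def compress_garbage (cleaner_garbage : String) : String × Int :=
  let st := cleaner_garbage.toList.foldl
    (fun (acc : List Char × Bool × Int) char =>
      let active₁ := if char = '>' then false else acc.2.1
      let (out₂, cnt₂) :=
        if ¬ active₁ then (acc.1 ++ [char], acc.2.2) else (acc.1, acc.2.2 + 1)
      let active₃ := if char = '<' then true else active₁
      (out₂, active₃, cnt₂))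
    ([], false, 0)
  (String.ofList st.1, st.2.2)

-- ===== PORT B =====
-- B's scan: copy up to the next '<', then jump to the matching '>' (takeWhile/dropWhile = find), count the span.
def cgAltGo : List Char → List Char × Int
  | [] => ([], 0)
  | c :: rest =>
    if c = '<' then
      match h : rest.dropWhile (· ≠ '>') with
      | [] => (['<'], ((rest.takeWhile (· ≠ '>')).length : Int))
      | _ :: tail =>
        let r := cgAltGo tail
        ('<' :: '>' :: r.1, ((rest.takeWhile (· ≠ '>')).length : Int) + r.2)
    else
      let r := cgAltGo rest
      (c :: r.1, r.2)
termination_by cs => cs.length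
decreasing_by
  · have h1 : (rest.dropWhile (· ≠ '>')).length ≤ rest.length :=
      List.length_dropWhile_le _ _
    rw [h] at h1
    simp at h1 ⊢
    omega
  · simp

def compress_garbage_alt (cleaner_garbage : String) : String × Int :=
  let r := cgAltGo cleaner_garbage.toList
  (String.ofList r.1, r.2)

-- ===== PRECONDITION & SPEC =====
def Spec_compress_garbage (cleaner_garbage : String) (out : String × Int) : Prop := out = compress_garbage_alt cleaner_garbage
instance (cleaner_garbage : String) (out : String × Int) : Decidable (Spec_compress_garbage cleaner_garbage out) := by unfold Spec_compress_garbage; infer_instance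

-- ===== CLAIM (what is proved, stated in full; the proofs are below) =====
def Claim_equal_compress_garbage : Prop := ∀ (cleaner_garbage : String), Dom_compress_garbage cleaner_garbage → Spec_compress_garbage cleaner_garbage (compress_garbage cleaner_garbage)

-- ===== LEMMAS AND PROOFS =====

-- A's fold step, named for the lemmas
def cgStep (acc : List Char × Bool × Int) (char : Char) : List Char × Bool × Int :=
  let active₁ := if char = '>' then false else acc.2.1
  let (out₂, cnt₂) :=
    if ¬ active₁ then (acc.1 ++ [char], acc.2.2) else (acc.1, acc.2.2 + 1)
  let active₃ := if char = '<' then true else active₁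
  (out₂, active₃, cnt₂)

theorem cg_fold_eq (cs : List Char) (acc : List Char × Bool × Int) :
    cs.foldl
    (fun (acc : List Char × Bool × Int) char =>
      let active₁ := if char = '>' then false else acc.2.1
      let (out₂, cnt₂) :=
        if ¬ active₁ then (acc.1 ++ [char], acc.2.2) else (acc.1, acc.2.2 + 1)
      let active₃ := if char = '<' then true else active₁
      (out₂, active₃, cnt₂)) acc = cs.foldl cgStep acc := rfl

-- equation lemmas for cgAltGo
theorem cgAltGo_nil : cgAltGo [] = ([], 0) := by rw [cgAltGo]

theorem cgAltGo_lt_open (rest : List Char) (h : rest.dropWhile (· ≠ '>') = []) :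
    cgAltGo ('<' :: rest) = (['<'], ((rest.takeWhile (· ≠ '>')).length : Int)) := by
  rw [cgAltGo]
  split
  · split
    · rfl
    · rename_i heq; rw [h] at heq; cases heq
  · rename_i hfalse; exact absurd rfl hfalse

theorem cgAltGo_lt_closed (rest : List Char) (d : Char) (tail : List Char)
    (h : rest.dropWhile (· ≠ '>') = d :: tail) :
    cgAltGo ('<' :: rest) =
      ('<' :: '>' :: (cgAltGo tail).1,
        ((rest.takeWhile (· ≠ '>')).length : Int) + (cgAltGo tail).2) := by
  rw [cgAltGo]
  split
  · split
    · rename_i heq; rw [h] at heq; cases heq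
    · rename_i d' tail' heq
      rw [h] at heq
      cases heq
      rfl
  · rename_i hfalse; exact absurd rfl hfalse

theorem cgAltGo_ne (c : Char) (rest : List Char) (hc : c ≠ '<') :
    cgAltGo (c :: rest) = (c :: (cgAltGo rest).1, (cgAltGo rest).2) := by
  rw [cgAltGo]
  simp [hc]

-- running A's loop over a '>'-free block in the active state just counts its length
theorem cg_active_run (g : List Char) (hg : ∀ c ∈ g, c ≠ '>') (rest : List Char)
    (out : List Char) (cnt : Int) :
    (g ++ rest).foldl cgStep (out, true, cnt) =
      rest.foldl cgStep (out, true, cnt + g.length) := by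
  induction g generalizing cnt with
  | nil => simp
  | cons c g ih =>
    have hc : c ≠ '>' := hg c (by simp)
    have step : cgStep (out, true, cnt) c = (out, true, cnt + 1) := by
      simp [cgStep, hc]
    simp only [List.cons_append, List.foldl_cons, step]
    rw [ih (fun x hx => hg x (by simp [hx]))]
    congr 1
    simp only [Prod.mk.injEq, List.length_cons, true_and]
    push_cast
    ring

-- main invariant: from an inactive state, A's loop computes B's span scan
theorem cg_main (cs : List Char) (out : List Char) (cnt : Int) :
    ((cs.foldl cgStep (out, false, cnt)).1 = out ++ (cgAltGo cs).1) ∧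
    ((cs.foldl cgStep (out, false, cnt)).2.2 = cnt + (cgAltGo cs).2) := by
  induction cs using cgAltGo.induct generalizing out cnt with
  | case1 => simp [cgAltGo_nil]
  | case2 rest hdrop =>
    -- '<' begins garbage, never closed: the rest is all garbage
    have hrest : rest = rest.takeWhile (· ≠ '>') := by
      have := List.takeWhile_append_dropWhile (p := (· ≠ '>')) (l := rest)
      rw [hdrop] at this; simpa using this.symm
    have hallg : ∀ x ∈ rest.takeWhile (· ≠ '>'), x ≠ '>' := by
      intro x hx
      simpa using List.mem_takeWhile_imp hx
    have step : cgStep (out, false, cnt) '<' = (out ++ ['<'], true, cnt) := by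
      simp [cgStep]
    simp only [List.foldl_cons, step]
    have hrun : List.foldl cgStep (out ++ ['<'], true, cnt) rest =
        List.foldl cgStep (out ++ ['<'], true,
          cnt + ((rest.takeWhile (· ≠ '>')).length : Int)) [] := by
      conv_lhs => rw [show rest = rest.takeWhile (· ≠ '>') ++ ([] : List Char) by
        simpa using hrest]
      exact cg_active_run _ hallg [] _ _
    rw [hrun]
    simp [cgAltGo_lt_open rest hdrop]
  | case3 rest d tail hdrop ih =>
    -- '<' begins garbage, closed by '>'
    have hd : d = '>' := by
      have h2 := List.head_dropWhile_not (p := (· ≠ '>')) (l := rest)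
      rw [hdrop] at h2
      simpa using h2 (by simp)
    subst hd
    have hrest : rest = rest.takeWhile (· ≠ '>') ++ '>' :: tail := by
      have := List.takeWhile_append_dropWhile (p := (· ≠ '>')) (l := rest)
      rw [hdrop] at this; exact this.symm
    have hallg : ∀ x ∈ rest.takeWhile (· ≠ '>'), x ≠ '>' := by
      intro x hx
      simpa using List.mem_takeWhile_imp hx
    have step : cgStep (out, false, cnt) '<' = (out ++ ['<'], true, cnt) := by
      simp [cgStep]
    have stepGt : ∀ o (k : Int), cgStep (o, true, k) '>' = (o ++ ['>'], false, k) := by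
      intro o k; simp [cgStep]
    simp only [List.foldl_cons, step]
    have hrun : List.foldl cgStep (out ++ ['<'], true, cnt) rest =
        List.foldl cgStep (out ++ ['<'], true,
          cnt + ((rest.takeWhile (· ≠ '>')).length : Int)) ('>' :: tail) := by
      conv_lhs => rw [hrest]
      exact cg_active_run _ hallg _ _ _
    rw [hrun, List.foldl_cons, stepGt]
    obtain ⟨ih1, ih2⟩ := ih (out ++ ['<', '>']) (cnt + (rest.takeWhile (· ≠ '>')).length)
    rw [show out ++ ['<'] ++ ['>'] = out ++ ['<', '>'] by simp]
    refine ⟨?_, ?_⟩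
    · rw [ih1, cgAltGo_lt_closed rest '>' tail hdrop]
      simp
    · rw [ih2, cgAltGo_lt_closed rest '>' tail hdrop]
      push_cast
      ring
  | case4 c rest hc ih =>
    have step : cgStep (out, false, cnt) c = (out ++ [c], if c = '<' then true else false, cnt) := by
      simp [cgStep]
    simp only [List.foldl_cons, step, hc, if_false]
    obtain ⟨ih1, ih2⟩ := ih (out ++ [c]) cnt
    refine ⟨?_, ?_⟩
    · rw [ih1, cgAltGo_ne c rest hc]; simp
    · rw [ih2, cgAltGo_ne c rest hc]

-- ===== VERDICT (by name: the statement is the Claim_ definition above) =====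
theorem compress_garbage_spec : Claim_equal_compress_garbage := by
  intro s _
  unfold Spec_compress_garbage compress_garbage compress_garbage_alt
  rw [cg_fold_eq]
  obtain ⟨h1, h2⟩ := cg_main s.toList [] 0
  simp only [h1, h2]
  simp
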